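-- pv_equiv track=rewrite | github.com/tsani/coding-cat-public | four-two-relationship/mutation_6.py | four_two_relationship
-- ===== SOURCE A (Python) =====
-- def four_two_relationship(lst):
--     '''
--        Only check the before element, not the after element
--     '''
--     find_2=False
--     find_4=False
--     for number in lst:
--         if number==2:
--             find_2=True
--         if number==4:
--             find_4=True
--     if find_2 and find_4:
--         for i in range(len(lst) - 1):
--             if lst[i] == 4 and lst[i + 1] == 2:
--                 return False
--         return True
--     return False
-- ===== SOURCE B (Python) =====
-- def four_two_relationship(lst):
--     saw_2 = False
--     saw_4 = False
--     bad = False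
--     prev = None
--     for n in lst:
--         saw_2 = saw_2 or n == 2
--         saw_4 = saw_4 or n == 4
--         bad = bad or (prev == 4 and n == 2)
--         prev = n
--     return saw_2 and saw_4 and not bad
-- ===== Notes on version B (the rewrite author's own statement) =====
-- stated objective: simpler
-- what changed: Replaces A's two passes (a membership pass then a conditional index loop over range(len-1)) with one single pass that tracks saw_2, saw_4 and a bad flag via a previous-element variable.
import Mathlib
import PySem

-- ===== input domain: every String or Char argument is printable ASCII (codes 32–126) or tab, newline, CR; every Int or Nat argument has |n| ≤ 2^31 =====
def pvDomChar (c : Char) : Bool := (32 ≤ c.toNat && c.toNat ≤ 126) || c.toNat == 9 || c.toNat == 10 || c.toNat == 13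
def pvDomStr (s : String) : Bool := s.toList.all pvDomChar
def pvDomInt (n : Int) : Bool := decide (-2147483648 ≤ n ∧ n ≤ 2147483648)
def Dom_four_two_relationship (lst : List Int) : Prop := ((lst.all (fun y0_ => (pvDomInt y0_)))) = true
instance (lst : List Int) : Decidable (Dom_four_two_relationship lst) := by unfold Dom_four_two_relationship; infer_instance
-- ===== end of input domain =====

-- B replaces A's two passes (membership pass + conditional index loop) with one single
-- pass tracking saw_2/saw_4 and a bad-adjacency flag via a previous-element variable (simpler).

-- ===== PORT A =====
-- the 'for i in range(len(lst)-1)' loop with its early 'return False'; indices i and i+1 are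
-- always in range here, so pyGetD (default never used) is exact for lst[i] / lst[i+1]
def pvCheckAdjA (lst : List Int) : List Int → Bool
  | [] => true
  | i :: rest =>
    if PySem.List.pyGetD lst i 0 == 4 && PySem.List.pyGetD lst (i + 1) 0 == 2 then false
    else pvCheckAdjA lst rest

def four_two_relationship (lst : List Int) : Bool :=
  let s := lst.foldl
    (fun (s : Bool × Bool) number =>
      (if number == 2 then true else s.1, if number == 4 then true else s.2))
    (false, false)
  if s.1 && s.2 then
    pvCheckAdjA lst (PySem.List.pyRange 0 ((lst.length : Int) - 1) 1)
  else false

-- ===== PORT B =====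
-- state: (saw_2, saw_4, bad, prev); prev = none is Python's prev = None sentinel
def four_two_relationship_alt (lst : List Int) : Bool :=
  let s := lst.foldl
    (fun (s : Bool × Bool × Bool × Option Int) n =>
      (s.1 || n == 2, s.2.1 || n == 4, s.2.2.1 || (s.2.2.2 == some 4 && n == 2), some n))
    (false, false, false, none)
  s.1 && s.2.1 && !s.2.2.1

-- ===== PRECONDITION & SPEC =====
def Spec_four_two_relationship (lst : List Int) (out : Bool) : Prop := out = four_two_relationship_alt lst
instance (lst : List Int) (out : Bool) : Decidable (Spec_four_two_relationship lst out) := by unfold Spec_four_two_relationship; infer_instance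

-- ===== CLAIM (what is proved, stated in full; the proofs are below) =====
def Claim_equal_four_two_relationship : Prop := ∀ (lst : List Int), Dom_four_two_relationship lst → Spec_four_two_relationship lst (four_two_relationship lst)

-- ===== LEMMAS AND PROOFS =====

-- reference form: is there any adjacent 4-then-2 pair?
def pvHasAdj : List Int → Bool
  | x :: y :: r => (x == 4 && y == 2) || pvHasAdj (y :: r)
  | _ => false

def pvLastD (p : Int) : List Int → Int
  | [] => p
  | x :: r => pvLastD x r

-- A's first loop computes membership of 2 and of 4
theorem pvA_find (lst : List Int) (a b : Bool) :
    lst.foldl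
      (fun (s : Bool × Bool) number =>
        (if number == 2 then true else s.1, if number == 4 then true else s.2))
      (a, b)
    = (a || lst.any (· == 2), b || lst.any (· == 4)) := by
  induction lst generalizing a b with
  | nil => simp
  | cons x r ih =>
    simp only [List.foldl_cons, List.any_cons, ih]
    by_cases h2 : x = 2 <;> by_cases h4 : x = 4 <;>
      simp [show ((x == 2) : Bool) = decide (x = 2) from rfl,
        show ((x == 4) : Bool) = decide (x = 4) from rfl, h2, h4]

-- A's second loop over range(len-1): generalized over a consumed prefix
theorem pvA_adj (rest : List Int) : ∀ (pre : List Int) (x : Int),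
    pvCheckAdjA (pre ++ x :: rest)
      (PySem.List.pyRange (pre.length : Int) (((pre ++ x :: rest).length : Int) - 1) 1)
    = !pvHasAdj (x :: rest) := by
  induction rest with
  | nil =>
    intro pre x
    rw [PySem.List.pyRange_one_eq_nil (by simp)]
    simp [pvCheckAdjA, pvHasAdj]
  | cons y r ih =>
    intro pre x
    rw [PySem.List.pyRange_one_cons (by simp; omega)]
    simp only [pvCheckAdjA]
    have hx : PySem.List.pyGetD (pre ++ x :: y :: r) (pre.length : Int) 0 = x := by
      rw [PySem.List.pyGetD_natCast]
      simp [List.getD_eq_getElem?_getD]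
    have hy : PySem.List.pyGetD (pre ++ x :: y :: r) ((pre.length : Int) + 1) 0 = y := by
      rw [show ((pre.length : Int) + 1) = ((pre.length + 1 : Nat) : Int) by push_cast; ring,
        PySem.List.pyGetD_natCast]
      simp [List.getD_eq_getElem?_getD]
    rw [hx, hy]
    by_cases h : x = 4 ∧ y = 2
    · simp [h.1, h.2, pvHasAdj]
    · have hb : (x == 4 && y == 2) = false := by
        rcases not_and_or.mp h with h' | h' <;> simp [h']
      rw [if_neg (by simp [hb])]
      have := ih (pre ++ [x]) y
      rw [show ((pre ++ [x]).length : Int) = (pre.length : Int) + 1 by simp] at this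
      rw [show pre ++ [x] ++ y :: r = pre ++ x :: y :: r by simp] at this
      rw [this, pvHasAdj, hb]
      simp

-- B's single pass, with a generalized running state
theorem pvB_fold (lst : List Int) : ∀ (s2 s4 bad : Bool) (p : Int),
    lst.foldl
      (fun (s : Bool × Bool × Bool × Option Int) n =>
        (s.1 || n == 2, s.2.1 || n == 4, s.2.2.1 || (s.2.2.2 == some 4 && n == 2), some n))
      (s2, s4, bad, some p)
    = (s2 || lst.any (· == 2), s4 || lst.any (· == 4), bad || pvHasAdj (p :: lst), some (pvLastD p lst)) := by
  induction lst with
  | nil => simp [pvHasAdj, pvLastD]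
  | cons x r ih =>
    intro s2 s4 bad p
    simp only [List.foldl_cons, List.any_cons, ih, pvLastD, pvHasAdj]
    refine Prod.ext ?_ (Prod.ext ?_ (Prod.ext ?_ rfl)) <;> simp [Bool.or_assoc]

theorem pvB_eq (lst : List Int) :
    four_two_relationship_alt lst
    = (lst.any (· == 2) && lst.any (· == 4) && !pvHasAdj lst) := by
  unfold four_two_relationship_alt
  cases lst with
  | nil => simp [pvHasAdj]
  | cons x r =>
    simp only [List.foldl_cons, List.any_cons]
    rw [show ((false || (x == 2), false || (x == 4),
          false || ((none : Option Int) == some 4 && x == 2), some x) : Bool × Bool × Bool × Option Int)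
        = ((x == 2), (x == 4), false, some x) by simp]
    rw [pvB_fold]
    simp

theorem pvA_eq (lst : List Int) :
    four_two_relationship lst
    = (lst.any (· == 2) && lst.any (· == 4) && !pvHasAdj lst) := by
  unfold four_two_relationship
  rw [pvA_find]
  simp only [Bool.false_or]
  by_cases h2 : lst.any (· == 2)
  · by_cases h4 : lst.any (· == 4)
    · simp only [h2, h4, Bool.and_true, Bool.true_and, if_true]
      cases lst with
      | nil => simp at h2
      | cons x r =>
        have := pvA_adj r [] x
        simpa using this
    · simp [h2, h4]
  · simp [h2]

-- ===== VERDICT (by name: the statement is the Claim_ definition above) =====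
theorem four_two_relationship_spec : Claim_equal_four_two_relationship := by
  intro lst _
  unfold Spec_four_two_relationship
  rw [pvA_eq, pvB_eq]
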